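-- pv_equiv track=rewrite | github.com/SRIDHAR0309/Legal_Contract_analysis_chatbot | app.py | _fix_common_typos
-- ===== SOURCE A (Python) =====
-- def _fix_common_typos(text: str) -> str:
--     # Minimal, targeted corrections for common OCR/typos seen in contracts
--     replacements = {
--         "transfered": "transferred",
--         "tranfered": "transferred",
--         "benificiar": "beneficiar",
--         "beneficaries": "beneficiaries",
--         "beneficary": "beneficiary",
--         "liqidity": "liquidity",
--         "liqiudity": "liquidity",
--         "tegy": "strategy",
--         "recieve": "receive",
--         "recieved": "received",
--         "adress": "address",
--         "ammount": "amount",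
--         "amout": "amount",
--     }
--     for a, b in replacements.items():
--         text = text.replace(a, b).replace(a.capitalize(), b.capitalize())
--     return text
-- ===== SOURCE B (Python) =====
-- # Streams the text once through a chain of lazy substitution transducers (one
-- # generator per pattern, capitalized forms flattened in), instead of building
-- # 13 intermediate strings with chained str.replace; later stages consume the
-- # char stream emitted by earlier ones, so cascaded corrections are preserved.
-- _PAIRS = [
--     ("transfered", "transferred"), ("Transfered", "Transferred"),
--     ("tranfered", "transferred"), ("Tranfered", "Transferred"),
--     ("benificiar", "beneficiar"), ("Benificiar", "Beneficiar"),
--     ("beneficaries", "beneficiaries"), ("Beneficaries", "Beneficiaries"),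
--     ("beneficary", "beneficiary"), ("Beneficary", "Beneficiary"),
--     ("liqidity", "liquidity"), ("Liqidity", "Liquidity"),
--     ("liqiudity", "liquidity"), ("Liqiudity", "Liquidity"),
--     ("tegy", "strategy"), ("Tegy", "Strategy"),
--     ("recieve", "receive"), ("Recieve", "Receive"),
--     ("recieved", "received"), ("Recieved", "Received"),
--     ("adress", "address"), ("Adress", "Address"),
--     ("ammount", "amount"), ("Ammount", "Amount"),
--     ("amout", "amount"), ("Amout", "Amount"),
-- ]
--
-- def _sub(stream, typo, fix):
--     # Streaming leftmost non-overlapping substitution: keep a pending window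
--     # that is always a prefix of `typo`; emit chars as soon as they can no
--     # longer start a match, emit `fix` when the window completes the pattern.
--     buf = ""
--     for c in stream:
--         buf += c
--         while buf and not typo.startswith(buf):
--             yield buf[0]
--             buf = buf[1:]
--         if buf == typo:
--             yield from fix
--             buf = ""
--     yield from buf
--
-- def _fix_common_typos(text: str) -> str:
--     stream = iter(text)
--     for typo, fix in _PAIRS:
--         stream = _sub(stream, typo, fix)
--     return "".join(stream)
-- ===== Notes on version B (the rewrite author's own statement) =====
-- stated objective: alternative
-- what changed: B replaces the loop of 13 whole-string str.replace passes (each materializing new strings and calling .capitalize() at runtime) by a single lazy pipeline of 26 streaming substitution transducers (one generator per flattened pattern) through which the text flows once; each transducer keeps a pending prefix-of-pattern window, so cascaded corrections across stages are preserved exactly.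
import Mathlib
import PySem

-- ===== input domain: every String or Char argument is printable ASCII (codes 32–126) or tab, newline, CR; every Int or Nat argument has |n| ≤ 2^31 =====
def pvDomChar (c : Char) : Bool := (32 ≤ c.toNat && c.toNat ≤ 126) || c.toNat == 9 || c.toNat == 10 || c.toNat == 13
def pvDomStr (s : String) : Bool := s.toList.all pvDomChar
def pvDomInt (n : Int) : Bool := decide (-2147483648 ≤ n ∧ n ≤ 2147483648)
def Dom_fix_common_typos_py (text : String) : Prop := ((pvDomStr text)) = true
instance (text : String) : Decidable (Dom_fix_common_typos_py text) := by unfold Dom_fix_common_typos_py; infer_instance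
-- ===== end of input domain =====

-- B streams the text once through a chain of 26 lazy substitution transducers (a
-- pending-prefix window per pattern) instead of 13 whole-string str.replace passes
-- with runtime .capitalize(); objective: alternative (same result, single traversal).

-- ===== PORT A =====
-- s.capitalize() — hand-ported (PySem has no capitalize); exact on the ASCII domain:
-- first character uppercased, the rest lowercased.
def pyCapitalize (s : String) : String :=
  match s.toList with
  | [] => ""
  | c :: t => String.ofList (PySem.Chars.upperChar c :: PySem.Chars.lower t)

def fix_common_typos_py (text : String) : String :=
  let replacements : PySem.Dict String String := PySem.Dict.mk
    [ ("transfered", "transferred"), ("tranfered", "transferred"),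
      ("benificiar", "beneficiar"), ("beneficaries", "beneficiaries"),
      ("beneficary", "beneficiary"), ("liqidity", "liquidity"),
      ("liqiudity", "liquidity"), ("tegy", "strategy"),
      ("recieve", "receive"), ("recieved", "received"),
      ("adress", "address"), ("ammount", "amount"), ("amout", "amount") ]
  replacements.items.foldl
    (fun t ab =>
      PySem.Str.replace (PySem.Str.replace t ab.1 ab.2)
        (pyCapitalize ab.1) (pyCapitalize ab.2))
    text

-- ===== PORT B =====
-- The flat table of Source B: the 13 corrections with their capitalized forms spelled out.
def pvPairs : List (String × String) :=
  [ ("transfered", "transferred"), ("Transfered", "Transferred"),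
    ("tranfered", "transferred"), ("Tranfered", "Transferred"),
    ("benificiar", "beneficiar"), ("Benificiar", "Beneficiar"),
    ("beneficaries", "beneficiaries"), ("Beneficaries", "Beneficiaries"),
    ("beneficary", "beneficiary"), ("Beneficary", "Beneficiary"),
    ("liqidity", "liquidity"), ("Liqidity", "Liquidity"),
    ("liqiudity", "liquidity"), ("Liqiudity", "Liquidity"),
    ("tegy", "strategy"), ("Tegy", "Strategy"),
    ("recieve", "receive"), ("Recieve", "Receive"),
    ("recieved", "received"), ("Recieved", "Received"),
    ("adress", "address"), ("Adress", "Address"),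
    ("ammount", "amount"), ("Ammount", "Amount"),
    ("amout", "amount"), ("Amout", "Amount") ]

-- Source B's inner `while buf and not typo.startswith(buf)` loop: emit pending chars
-- until the window is empty or a prefix of the pattern again.
def pvDrain (typo : List Char) : List Char → List Char × List Char
  | [] => ([], [])
  | d :: w =>
    if (d :: w).isPrefixOf typo then ([], d :: w)
    else (d :: (pvDrain typo w).1, (pvDrain typo w).2)

-- One transducer stage `_sub` of Source B: feed chars into the pending window, drain,
-- emit the fix when the window completes the pattern; flush the window at the end.
def pvSubGo (typo fix : List Char) : List Char → List Char → List Char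
  | buf, [] => buf
  | buf, c :: rest =>
    if (pvDrain typo (buf ++ [c])).2 = typo then
      (pvDrain typo (buf ++ [c])).1 ++ fix ++ pvSubGo typo fix [] rest
    else
      (pvDrain typo (buf ++ [c])).1 ++ pvSubGo typo fix (pvDrain typo (buf ++ [c])).2 rest

def fix_common_typos_py_alt (text : String) : String :=
  String.ofList
    (pvPairs.foldl (fun s pf => pvSubGo pf.1.toList pf.2.toList [] s) text.toList)

-- ===== PRECONDITION & SPEC =====
def Spec_fix_common_typos_py (text : String) (out : String) : Prop := out = fix_common_typos_py_alt text
instance (text : String) (out : String) : Decidable (Spec_fix_common_typos_py text out) := by unfold Spec_fix_common_typos_py; infer_instance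

-- ===== CLAIM (what is proved, stated in full; the proofs are below) =====
def Claim_equal_fix_common_typos_py : Prop := ∀ (text : String), Dom_fix_common_typos_py text → Spec_fix_common_typos_py text (fix_common_typos_py text)

-- ===== LEMMAS AND PROOFS =====

-- Clean recursive form of Python's str.replace for a nonempty pattern.
def repF (old new : List Char) : List Char → List Char
  | [] => []
  | c :: t =>
    if h : old ≠ [] ∧ old.isPrefixOf (c :: t) then
      new ++ repF old new ((c :: t).drop old.length)
    else c :: repF old new t
termination_by s => s.length
decreasing_by
  · have hle : old.length ≤ (c :: t).length :=
      (List.isPrefixOf_iff_prefix.mp h.2).length_le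
    have h0 : old ≠ [] := h.1
    have : 0 < old.length := List.length_pos_iff.mpr h0
    simp only [List.length_drop]
    simp at hle ⊢
    omega
  · simp

theorem rep_go_eq (old new : List Char) (hold : old ≠ []) :
    ∀ fuel s acc, s.length ≤ fuel →
      PySem.Chars.replace.go old new fuel s acc = acc.reverse ++ repF old new s := by
  intro fuel
  induction fuel with
  | zero =>
    intro s acc hs
    have : s = [] := by
      cases s with
      | nil => rfl
      | cons c t => simp at hs
    subst this
    simp [PySem.Chars.replace.go, repF]
  | succ n ih =>
    intro s acc hs
    cases s with
    | nil => simp [PySem.Chars.replace.go, repF]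
    | cons c t =>
      rw [PySem.Chars.replace.go]
      by_cases hp : old.isPrefixOf (c :: t)
      · simp only [hp, if_true]
        have hle : old.length ≤ (c :: t).length :=
          (List.isPrefixOf_iff_prefix.mp hp).length_le
        have h0 : 0 < old.length := List.length_pos_iff.mpr hold
        have hlen : ((c :: t).drop old.length).length ≤ n := by
          simp only [List.length_drop]
          simp at hle hs ⊢
          omega
        rw [ih _ _ hlen]
        rw [repF]
        simp [hold, hp]
      · simp only [hp]
        have hlen : t.length ≤ n := by simp at hs; omega
        rw [ih _ _ hlen]
        rw [repF]
        simp [hp]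

theorem replace_eq_repF (s old new : List Char) (hold : old ≠ []) :
    PySem.Chars.replace s old new = repF old new s := by
  unfold PySem.Chars.replace
  have : old.isEmpty = false := by simp [hold]
  rw [this]
  simp only [Bool.false_eq_true, if_false]
  rw [rep_go_eq old new hold s.length s [] le_rfl]
  simp

-- repF matches its pattern at the head.
theorem repF_head_match (typo fix rest : List Char) (ht : typo ≠ []) :
    repF typo fix (typo ++ rest) = fix ++ repF typo fix ((typo ++ rest).drop typo.length) := by
  cases typo with
  | nil => exact absurd rfl ht
  | cons a t =>
    rw [List.cons_append, repF, dif_pos]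
    constructor
    · simp
    · rw [← List.cons_append]
      exact List.isPrefixOf_iff_prefix.mpr (List.prefix_append _ _)

-- repF leaves a string shorter than its pattern unchanged.
theorem repF_short (typo fix : List Char) :
    ∀ s, s.length < typo.length → repF typo fix s = s := by
  intro s
  induction s with
  | nil => intro _; simp [repF]
  | cons c t ih =>
    intro hs
    rw [repF, dif_neg]
    · rw [ih (by simp at hs ⊢; omega)]
    · rintro ⟨-, hp⟩
      have := (List.isPrefixOf_iff_prefix.mp hp).length_le
      omega

-- The drained window is always a prefix of the pattern.
theorem pvDrain_snd_prefix (typo : List Char) :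
    ∀ w, (pvDrain typo w).2 <+: typo := by
  intro w
  induction w with
  | nil => simp [pvDrain]
  | cons d w ih =>
    rw [pvDrain]
    by_cases h : (d :: w).isPrefixOf typo
    · simp only [h, if_true]
      exact List.isPrefixOf_iff_prefix.mp h
    · simp only [h]
      simpa using ih

-- Draining a short window commutes with repF: the emitted chars are final and the
-- kept window's fate is decided by the rest of the stream.
theorem pvDrain_repF (typo fix : List Char) (ht : typo ≠ []) :
    ∀ w, w.length ≤ typo.length → ∀ rest,
      repF typo fix (w ++ rest)
        = (pvDrain typo w).1 ++
            (if (pvDrain typo w).2 = typo then fix ++ repF typo fix rest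
             else repF typo fix ((pvDrain typo w).2 ++ rest)) := by
  intro w
  induction w with
  | nil =>
    intro _ rest
    rw [pvDrain]
    rw [if_neg (fun h => ht h.symm)]
    simp
  | cons d w ih =>
    intro hlen rest
    by_cases h : (d :: w).isPrefixOf typo
    · rw [pvDrain]
      simp only [h, if_true, List.nil_append]
      by_cases he : d :: w = typo
      · rw [if_pos he, he, repF_head_match typo fix rest ht]
        simp
      · rw [if_neg he]
    · have hnp : ¬ typo <+: (d :: w) ++ rest := by
        intro hp
        have h1 : (d :: w) <+: (d :: w) ++ rest := List.prefix_append _ _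
        have h2 : (d :: w) <+: typo :=
          List.prefix_of_prefix_length_le h1 hp (by simpa using hlen)
        exact h (List.isPrefixOf_iff_prefix.mpr h2)
      have hstep : repF typo fix ((d :: w) ++ rest) = d :: repF typo fix (w ++ rest) := by
        rw [List.cons_append, repF, dif_neg]
        rintro ⟨-, hp⟩
        exact hnp (by rw [List.cons_append]; exact List.isPrefixOf_iff_prefix.mp hp)
      rw [hstep, ih (by simp at hlen ⊢; omega) rest]
      rw [pvDrain]
      simp only [h]
      simp

-- The transducer stage computes exactly repF on the pending window plus the stream.
theorem pvSubGo_repF (typo fix : List Char) (ht : typo ≠ []) :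
    ∀ s buf, buf <+: typo → buf ≠ typo →
      pvSubGo typo fix buf s = repF typo fix (buf ++ s) := by
  intro s
  induction s with
  | nil =>
    intro buf hp hne
    have hlt : buf.length < typo.length := by
      rcases Nat.lt_or_ge buf.length typo.length with h | h
      · exact h
      · exact absurd (List.IsPrefix.eq_of_length hp (le_antisymm hp.length_le h)) hne
    rw [pvSubGo, List.append_nil, repF_short typo fix buf hlt]
  | cons c rest ih =>
    intro buf hp hne
    have hlt : buf.length < typo.length := by
      rcases Nat.lt_or_ge buf.length typo.length with h | h
      · exact h
      · exact absurd (List.IsPrefix.eq_of_length hp (le_antisymm hp.length_le h)) hne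
    have hlen : (buf ++ [c]).length ≤ typo.length := by simp; omega
    have hassoc : buf ++ (c :: rest) = (buf ++ [c]) ++ rest := by simp
    rw [hassoc, pvDrain_repF typo fix ht (buf ++ [c]) hlen rest, pvSubGo]
    by_cases hb : (pvDrain typo (buf ++ [c])).2 = typo
    · rw [if_pos hb, if_pos hb, ih [] (List.nil_prefix) (fun h => ht h.symm)]
      simp
    · rw [if_neg hb, if_neg hb, ih _ (pvDrain_snd_prefix typo (buf ++ [c])) hb]

theorem pvSubGo_eq_repF (typo fix : List Char) (ht : typo ≠ []) (s : List Char) :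
    pvSubGo typo fix [] s = repF typo fix s := by
  simpa using pvSubGo_repF typo fix ht s [] (List.nil_prefix) (fun h => ht h.symm)

-- String-level fold of Str.replace = char-level fold of repF.
theorem fold_str_char :
    ∀ (ps : List (String × String)) (t : String), (∀ pf ∈ ps, pf.1.toList ≠ []) →
      ps.foldl (fun t pf => PySem.Str.replace t pf.1 pf.2) t
        = String.ofList (ps.foldl (fun s pf => repF pf.1.toList pf.2.toList s) t.toList) := by
  intro ps
  induction ps with
  | nil => intro t _; simp
  | cons p ps ih =>
    intro t h
    simp only [List.foldl_cons]
    rw [ih _ (fun pf hpf => h pf (List.mem_cons_of_mem _ hpf))]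
    congr 1
    have hrep : (PySem.Str.replace t p.1 p.2).toList
        = repF p.1.toList p.2.toList t.toList := by
      rw [PySem.Str.toList_replace]
      exact replace_eq_repF _ _ _ (h p (List.mem_cons_self))
    rw [hrep]

set_option maxHeartbeats 1600000 in
theorem pvPairs_fst_ne : ∀ pf ∈ pvPairs, pf.1.toList ≠ [] := by
  intro pf hpf
  simp only [pvPairs, List.mem_cons, List.not_mem_nil, or_false] at hpf
  rcases hpf with h | h | h | h | h | h | h | h | h | h | h | h | h | h | h | h | h | h | h | h | h | h | h | h | h | h <;> subst h <;> decide

-- B's fold of transducer stages equals the char-level fold of repF.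
theorem alt_eq_repF_fold (text : String) :
    fix_common_typos_py_alt text
      = String.ofList
          (pvPairs.foldl (fun s pf => repF pf.1.toList pf.2.toList s) text.toList) := by
  unfold fix_common_typos_py_alt
  apply congrArg
  apply PySem.List.foldl_congr_mem
  intro acc pf hpf
  exact pvSubGo_eq_repF pf.1.toList pf.2.toList (pvPairs_fst_ne pf hpf) acc

-- A's dict loop equals the String-level fold of Str.replace over the flat table.
theorem A_flat (text : String) :
    fix_common_typos_py text
      = pvPairs.foldl (fun t pf => PySem.Str.replace t pf.1 pf.2) text := by
  unfold fix_common_typos_py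
  simp only [pvPairs, List.foldl]
  have hc0 : pyCapitalize "transfered" = "Transfered" := rfl
  have hc1 : pyCapitalize "tranfered" = "Tranfered" := rfl
  have hc2 : pyCapitalize "benificiar" = "Benificiar" := rfl
  have hc3 : pyCapitalize "beneficaries" = "Beneficaries" := rfl
  have hc4 : pyCapitalize "beneficary" = "Beneficary" := rfl
  have hc5 : pyCapitalize "liqidity" = "Liqidity" := rfl
  have hc6 : pyCapitalize "liqiudity" = "Liqiudity" := rfl
  have hc7 : pyCapitalize "tegy" = "Tegy" := rfl
  have hc8 : pyCapitalize "recieve" = "Recieve" := rfl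
  have hc9 : pyCapitalize "recieved" = "Recieved" := rfl
  have hc10 : pyCapitalize "adress" = "Adress" := rfl
  have hc11 : pyCapitalize "ammount" = "Ammount" := rfl
  have hc12 : pyCapitalize "amout" = "Amout" := rfl
  have hv0 : pyCapitalize "transferred" = "Transferred" := rfl
  have hv1 : pyCapitalize "beneficiar" = "Beneficiar" := rfl
  have hv2 : pyCapitalize "beneficiaries" = "Beneficiaries" := rfl
  have hv3 : pyCapitalize "beneficiary" = "Beneficiary" := rfl
  have hv4 : pyCapitalize "liquidity" = "Liquidity" := rfl
  have hv5 : pyCapitalize "strategy" = "Strategy" := rfl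
  have hv6 : pyCapitalize "receive" = "Receive" := rfl
  have hv7 : pyCapitalize "received" = "Received" := rfl
  have hv8 : pyCapitalize "address" = "Address" := rfl
  have hv9 : pyCapitalize "amount" = "Amount" := rfl
  rw [hv0, hv1, hv2, hv3, hv4, hv5, hv6, hv7, hv8, hv9, hc0, hc1, hc2, hc3, hc4,
      hc5, hc6, hc7, hc8, hc9, hc10, hc11, hc12]

theorem ports_agree (text : String) :
    fix_common_typos_py text = fix_common_typos_py_alt text := by
  rw [A_flat, alt_eq_repF_fold, fold_str_char pvPairs text pvPairs_fst_ne]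

-- ===== VERDICT (by name: the statement is the Claim_ definition above) =====
theorem fix_common_typos_py_spec : Claim_equal_fix_common_typos_py := by
  intro text _
  unfold Spec_fix_common_typos_py
  exact ports_agree text
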